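-- pv_equiv track=rewrite | github.com/Paradorn-248/Computer-Programming | Lab07/city_view.py | south
-- ===== SOURCE A (Python) =====
-- def south(size,map) :
--     res = 0
--     row,column = size[0],size[1]
--     for i in range(column) :
--         max = map[row-1][i]
--         for j in range(row-1,-1,-1) :
--             if max < map[j][i] :
--                 res += 1
--                 max = map[j][i]
--             else :
--                 continue
--     return res + column
-- ===== SOURCE B (Python) =====
-- def south(size, map):
--     row, column = size[0], size[1]
--     res = column
--     for i in range(column):
--         for j in range(row - 1):
--             if all(map[k][i] < map[j][i] for k in range(j + 1, row)):
--                 res += 1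
--     return res
-- ===== Notes on version B (the rewrite author's own statement) =====
-- stated objective: alternative
-- what changed: B drops A's stateful running-maximum scan entirely and counts by the direct visibility definition: a building is visible from the south iff it is strictly taller than every building south of it in its column (an all() quantifier test per building), plus the always-visible south row.
import Mathlib
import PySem

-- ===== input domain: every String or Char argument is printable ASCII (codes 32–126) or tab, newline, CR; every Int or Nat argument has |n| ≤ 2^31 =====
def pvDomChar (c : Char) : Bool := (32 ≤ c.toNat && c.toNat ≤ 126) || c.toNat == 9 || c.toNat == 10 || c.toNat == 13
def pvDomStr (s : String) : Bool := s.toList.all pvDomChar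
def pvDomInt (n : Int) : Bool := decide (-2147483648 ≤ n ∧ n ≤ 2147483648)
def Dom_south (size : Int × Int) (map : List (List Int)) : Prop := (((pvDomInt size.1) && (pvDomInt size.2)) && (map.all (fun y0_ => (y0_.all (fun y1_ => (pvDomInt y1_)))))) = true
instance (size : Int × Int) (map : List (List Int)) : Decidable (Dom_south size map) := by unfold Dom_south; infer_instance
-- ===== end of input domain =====

-- B replaces A's stateful running-maximum scan by the direct visibility criterion —
-- count the buildings strictly taller than every building south of them in their
-- column — a different (quantifier-based) algorithm of the same result (objective:
-- alternative; not faster).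

-- ===== PORT A =====
def south (size : Int × Int) (map : List (List Int)) : Int :=
  ((PySem.List.pyRange 0 size.2 1).foldl
    (fun res i =>
      ((PySem.List.pyRange (size.1 - 1) (-1) (-1)).foldl
        (fun (st : Int × Int) j =>
          if st.2 < PySem.List.pyGetD (PySem.List.pyGetD map j []) i 0 then
            (st.1 + 1, PySem.List.pyGetD (PySem.List.pyGetD map j []) i 0)
          else st)
        (res, PySem.List.pyGetD (PySem.List.pyGetD map (size.1 - 1) []) i 0)).1)
    (0 : Int)) + size.2

-- ===== PORT B =====
def south_alt (size : Int × Int) (map : List (List Int)) : Int :=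
  (PySem.List.pyRange 0 size.2 1).foldl
    (fun res i =>
      (PySem.List.pyRange 0 (size.1 - 1) 1).foldl
        (fun (res : Int) j =>
          if (PySem.List.pyRange (j + 1) size.1 1).all
              (fun k => decide (PySem.List.pyGetD (PySem.List.pyGetD map k []) i 0 <
                                PySem.List.pyGetD (PySem.List.pyGetD map j []) i 0))
          then res + 1 else res)
        res)
    size.2

-- ===== PRECONDITION & SPEC =====
-- Pre_south holds exactly where the Python A returns without an IndexError: either no column
-- is scanned (column ≤ 0), or every accessed row exists and is at least `column` wide
-- (for row ≤ 0 only map[row-1] is read, through Python's negative-index rule).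
def Pre_south (size : Int × Int) (map : List (List Int)) : Prop :=
  size.2 ≤ 0 ∨
  (1 ≤ size.1 ∧ size.1 ≤ (map.length : Int) ∧
    ∀ l ∈ map.take size.1.toNat, size.2 ≤ (l.length : Int)) ∨
  (size.1 ≤ 0 ∧ -(map.length : Int) ≤ size.1 - 1 ∧
    size.2 ≤ ((PySem.List.pyGetD map (size.1 - 1) []).length : Int))
instance (size : Int × Int) (map : List (List Int)) : Decidable (Pre_south size map) := by
  unfold Pre_south; infer_instance

def pvWitness_south : (Int × Int) × List (List Int) := ((2, 2), [[1, 2], [3, 0]])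

def Spec_south (size : Int × Int) (map : List (List Int)) (out : Int) : Prop := out = south_alt size map
instance (size : Int × Int) (map : List (List Int)) (out : Int) : Decidable (Spec_south size map out) := by unfold Spec_south; infer_instance

-- ===== CLAIM (what is proved, stated in full; the proofs are below) =====
def Claim_equal_south : Prop := ∀ (size : Int × Int) (map : List (List Int)), Dom_south size map → Pre_south size map → Spec_south size map (south size map)

-- ===== LEMMAS AND PROOFS =====

-- At state maximum M = attained max of column values over indices (m, n),
-- value at m beats M iff it beats every value strictly north... south of it.
theorem key_iff (v : Int → Int) (n m : Nat) (M : Int)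
    (h1 : ∀ k : Nat, m < k → k < n → v ↑k ≤ M)
    (h2 : ∃ k0 : Nat, m < k0 ∧ k0 < n ∧ v ↑k0 = M) :
    M < v ↑m ↔ (∀ k : Nat, k < n → m < k → v ↑k < v ↑m) := by
  constructor
  · intro hM k hk hmk
    exact lt_of_le_of_lt (h1 k hmk hk) hM
  · intro hq
    obtain ⟨k0, hk1, hk2, hk3⟩ := h2
    rw [← hk3]
    exact hq k0 hk2 hk1

-- A's inner scan over indices m, m-1, …, 0, started at an attained maximum M of the
-- suffix (m, n), counts exactly the indices j ≤ m whose value beats all of (j, n).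
theorem countA (v : Int → Int) (n : Nat) :
    ∀ (m : Nat) (c M : Int),
      (∀ k : Nat, m < k → k < n → v ↑k ≤ M) →
      (∃ k0 : Nat, m < k0 ∧ k0 < n ∧ v ↑k0 = M) →
      ((PySem.List.pyRange (m : Int) (-1) (-1)).foldl
          (fun (st : Int × Int) j => if st.2 < v j then (st.1 + 1, v j) else st) (c, M)).1
        = c + (((List.range (m + 1)).countP
            (fun j => decide (∀ k : Nat, k < n → j < k → v ↑k < v ↑j))) : Int) := by
  intro m
  induction m with
  | zero =>
      intro c M h1 h2
      have hiff := key_iff v n 0 M h1 h2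
      rw [show ((0 : Nat) : Int) = (0 : Int) from by norm_num]
      rw [PySem.List.pyRange_neg_one_cons (by norm_num : (-1 : Int) < 0)]
      rw [show (0 : Int) - 1 = -1 from by ring]
      rw [PySem.List.pyRange_neg_one_eq_nil (le_refl (-1 : Int))]
      simp only [List.foldl_cons, List.foldl_nil]
      by_cases hM : M < v ((0 : Nat) : Int)
      · rw [if_pos (by simpa using hM)]
        have hp : ∀ k : Nat, k < n → 0 < k → v ↑k < v 0 := by
          simpa using hiff.mp hM
        simp [List.range_one, List.countP_cons]
        exact hp
      · rw [if_neg (by simpa using hM)]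
        simp [List.range_one, List.countP_cons]
        obtain ⟨k0, hk1, hk2, hk3⟩ := h2
        exact ⟨k0, hk2, hk1, by rw [hk3]; simpa using not_lt.mp hM⟩
  | succ m ih =>
      intro c M h1 h2
      have hm1n : m + 1 < n := by obtain ⟨k0, hk1, hk2, _⟩ := h2; omega
      have hiff := key_iff v n (m + 1) M h1 h2
      rw [PySem.List.pyRange_neg_one_cons (by omega : (-1 : Int) < ((m + 1 : Nat) : Int))]
      rw [show ((m + 1 : Nat) : Int) - 1 = ((m : Nat) : Int) from by push_cast; ring]
      rw [List.foldl_cons, List.range_succ, List.countP_append]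
      simp only [List.countP_cons, List.countP_nil]
      by_cases hM : M < v ↑(m + 1)
      · rw [if_pos hM]
        rw [ih (c + 1) (v ↑(m + 1))
            (by
              intro k hk1 hk2
              by_cases hke : k = m + 1
              · subst hke; exact le_refl _
              · exact le_of_lt (lt_of_le_of_lt (h1 k (by omega) hk2) hM))
            ⟨m + 1, by omega, hm1n, rfl⟩]
        have hd : decide (∀ k : Nat, k < n → m + 1 < k → v ↑k < v ↑(m + 1)) = true :=
          decide_eq_true (hiff.mp hM)
        rw [hd]
        push_cast
        try simp
        try omega
      · rw [if_neg hM]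
        rw [ih c M
            (by
              intro k hk1 hk2
              by_cases hke : k = m + 1
              · subst hke; exact not_lt.mp hM
              · exact h1 k (by omega) hk2)
            (by obtain ⟨k0, hk1, hk2, hk3⟩ := h2; exact ⟨k0, by omega, hk2, hk3⟩)]
        have hd : decide (∀ k : Nat, k < n → m + 1 < k → v ↑k < v ↑(m + 1)) = false :=
          decide_eq_false (fun hq => hM (hiff.mpr hq))
        rw [hd]
        push_cast
        try simp
        try omega

-- One full column of A (n ≥ 1 rows, seed = the south row's value).
theorem A_col (v : Int → Int) (n : Nat) (hn : 1 ≤ n) (c : Int) :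
    ((PySem.List.pyRange ((n : Int) - 1) (-1) (-1)).foldl
        (fun (st : Int × Int) j => if st.2 < v j then (st.1 + 1, v j) else st)
        (c, v ((n : Int) - 1))).1
      = c + (((List.range (n - 1)).countP
          (fun j => decide (∀ k : Nat, k < n → j < k → v ↑k < v ↑j))) : Int) := by
  obtain ⟨m', rfl⟩ : ∃ m', n = m' + 1 := ⟨n - 1, by omega⟩
  rw [show ((m' + 1 : Nat) : Int) - 1 = ((m' : Nat) : Int) from by push_cast; ring]
  rw [PySem.List.pyRange_neg_one_cons (by omega : (-1 : Int) < ((m' : Nat) : Int))]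
  rw [List.foldl_cons, if_neg (lt_irrefl (v ((m' : Nat) : Int)))]
  cases m' with
  | zero =>
      rw [show ((0 : Nat) : Int) - 1 = -1 from by norm_num]
      rw [PySem.List.pyRange_neg_one_eq_nil (le_refl (-1 : Int))]
      simp
  | succ m =>
      rw [show ((m + 1 : Nat) : Int) - 1 = ((m : Nat) : Int) from by push_cast; ring]
      rw [countA v (m + 2) m c (v ↑(m + 1))
          (fun k hk1 hk2 => le_of_eq (by rw [show k = m + 1 from by omega]))
          ⟨m + 1, by omega, by omega, rfl⟩]
      rw [show (m + 1 + 1) - 1 = m + 1 from by omega]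

-- B's per-building test over columns... over the rows south of j equals the bounded quantifier.
theorem cond_eq (v : Int → Int) (n jn : Nat) :
    ((PySem.List.pyRange ((jn : Int) + 1) (n : Int) 1).all (fun k => decide (v k < v ((jn : Int)))))
      = decide (∀ k : Nat, k < n → jn < k → v ↑k < v ↑jn) := by
  rw [Bool.eq_iff_iff]
  simp only [List.all_eq_true, decide_eq_true_eq, PySem.List.mem_pyRange_one]
  constructor
  · intro h k hk hjk
    exact h ↑k ⟨by omega, by omega⟩
  · intro h x hx
    obtain ⟨hx1, hx2⟩ := hx
    have hx0 : (x.toNat : Int) = x := by omega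
    have hk := h x.toNat (by omega) (by omega)
    rwa [hx0] at hk

theorem foldl_count (p : Nat → Bool) (l : List Nat) : ∀ (r : Int),
    l.foldl (fun r j => if p j then r + 1 else r) r = r + (l.countP p : Int) := by
  induction l with
  | nil => intro r; simp
  | cons a l ih =>
      intro r
      simp only [List.foldl_cons, List.countP_cons]
      by_cases h : p a
      · rw [if_pos h, ih (r + 1), if_pos h]; push_cast; ring
      · rw [if_neg h, ih r, if_neg h]; push_cast; ring

-- One full column of B.
theorem B_col (v : Int → Int) (n : Nat) (r : Int) :
    ((PySem.List.pyRange 0 ((n : Int) - 1) 1).foldl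
        (fun (res : Int) j =>
          if (PySem.List.pyRange (j + 1) (n : Int) 1).all (fun k => decide (v k < v j))
          then res + 1 else res)
        r)
      = r + (((List.range (n - 1)).countP
          (fun j => decide (∀ k : Nat, k < n → j < k → v ↑k < v ↑j))) : Int) := by
  rw [PySem.List.pyRange_one]
  rw [show ((n : Int) - 1 - 0).toNat = n - 1 from by omega]
  rw [List.foldl_map]
  simp only [zero_add]
  simp only [cond_eq v n]
  rw [foldl_count]

theorem foldl_shift (C : Int → Int) (L : List Int) : ∀ (a : Int),
    L.foldl (fun r i => r + C i) a = a + L.foldl (fun r i => r + C i) 0 := by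
  induction L with
  | nil => intro a; simp
  | cons x L ih =>
      intro a
      simp only [List.foldl_cons]
      rw [ih (a + C x), ih (0 + C x)]
      ring

theorem outer_eq (L : List Int) (C : Int → Int) (col : Int)
    (gA gB : Int → Int → Int)
    (hA : ∀ r i, gA r i = r + C i) (hB : ∀ r i, gB r i = r + C i) :
    (L.foldl gA 0) + col = L.foldl gB col := by
  have hA' : gA = fun r i => r + C i := funext fun r => funext fun i => hA r i
  have hB' : gB = fun r i => r + C i := funext fun r => funext fun i => hB r i
  rw [hA', hB', foldl_shift C L 0, foldl_shift C L col]
  ring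

theorem foldl_id {α : Type} (l : List α) (b : Int) :
    l.foldl (fun r (_ : α) => r) b = b := by
  induction l with
  | nil => rfl
  | cons x l ih => simp [ih]

theorem south_eq (size : Int × Int) (map : List (List Int)) :
    south size map = south_alt size map := by
  obtain ⟨row, column⟩ := size
  unfold south south_alt
  dsimp only
  by_cases hr : 1 ≤ row
  · obtain ⟨n, hn, rfl⟩ : ∃ n : Nat, 1 ≤ n ∧ row = (n : Int) :=
      ⟨row.toNat, by omega, by omega⟩
    refine outer_eq _
      (fun i => (((List.range (n - 1)).countP
        (fun j => decide (∀ k : Nat, k < n →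
          j < k → PySem.List.pyGetD (PySem.List.pyGetD map ↑k []) i 0 <
                  PySem.List.pyGetD (PySem.List.pyGetD map ↑j []) i 0))) : Int))
      column _ _ ?_ ?_
    · intro r i
      exact A_col (fun j => PySem.List.pyGetD (PySem.List.pyGetD map j []) i 0) n hn r
    · intro r i
      exact B_col (fun j => PySem.List.pyGetD (PySem.List.pyGetD map j []) i 0) n r
  · rw [PySem.List.pyRange_neg_one_eq_nil (by omega : row - 1 ≤ (-1 : Int))]
    rw [PySem.List.pyRange_one_eq_nil (by omega : row - 1 ≤ 0)]
    simp only [List.foldl_nil]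
    rw [foldl_id, foldl_id]
    omega

-- ===== VERDICT (by name: the statement is the Claim_ definition above) =====
theorem south_spec : Claim_equal_south := by
  intro size map _ _
  unfold Spec_south
  exact south_eq size map
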